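-- pv_equiv track=rewrite | github.com/shivam-36/wordle-solver | neanderthal.py | get_letter_map
-- ===== SOURCE A (Python) =====
-- def get_letter_map(ip):
--     pos_map = {}
--     for word in ip:
--         for letter in word:
--             if letter not in pos_map:
--                 pos_map[letter] = []
--             pos_map[letter].append(word)
--     return pos_map
-- ===== SOURCE B (Python) =====
-- def get_letter_map(ip):
--     letters = dict.fromkeys(c for word in ip for c in word)
--     return {l: [word for word in ip for c in word if c == l] for l in letters}
-- ===== Notes on version B (the rewrite author's own statement) =====
-- stated objective: simpler
-- what changed: Replaces the single-pass dict-mutation loop (membership test, init, append) by a two-phase comprehension: first the distinct letters in first-occurrence order via dict.fromkeys, then one dict comprehension that collects, per letter, every word occurrence containing it.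
import Mathlib
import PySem

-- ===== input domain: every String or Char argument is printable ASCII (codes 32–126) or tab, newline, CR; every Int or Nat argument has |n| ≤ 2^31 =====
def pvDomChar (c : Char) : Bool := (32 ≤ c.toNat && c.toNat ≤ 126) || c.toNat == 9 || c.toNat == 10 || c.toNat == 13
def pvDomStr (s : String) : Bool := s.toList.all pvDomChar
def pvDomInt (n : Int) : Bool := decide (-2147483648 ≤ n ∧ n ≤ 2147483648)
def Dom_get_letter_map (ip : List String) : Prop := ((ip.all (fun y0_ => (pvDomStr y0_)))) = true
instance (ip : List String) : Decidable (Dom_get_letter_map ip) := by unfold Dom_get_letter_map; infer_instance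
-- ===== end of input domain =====

-- B replaces A's single-pass dict-mutation loop by a two-phase decomposition (distinct letters first,
-- then one comprehension per letter); objective: simpler, no speed claim.

-- ===== PORT A =====
def get_letter_map (ip : List String) : List (String × List String) :=
  (ip.foldl (fun pos_map word =>
    word.toList.foldl (fun pm letter =>
      let key := String.ofList [letter]
      let pm' := if pm.contains key then pm else pm.insert key ([] : List String)
      pm'.modify key [] (fun ws => ws ++ [word])) pos_map)
    (PySem.Dict.empty : PySem.Dict String (List String))).items

-- ===== PORT B =====
def get_letter_map_alt (ip : List String) : List (String × List String) :=
  let letters := PySem.List.dedup (ip.flatMap (fun word => word.toList))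
  letters.map (fun l => (String.ofList [l],
    ip.flatMap (fun word => (word.toList.filter (fun c => c == l)).map (fun _ => word))))

-- ===== PRECONDITION & SPEC =====
def Spec_get_letter_map (ip : List String) (out : List (String × List String)) : Prop := out = get_letter_map_alt ip
instance (ip : List String) (out : List (String × List String)) : Decidable (Spec_get_letter_map ip out) := by unfold Spec_get_letter_map; infer_instance

-- ===== CLAIM (what is proved, stated in full; the proofs are below) =====
def Claim_equal_get_letter_map : Prop := ∀ (ip : List String), Dom_get_letter_map ip → Spec_get_letter_map ip (get_letter_map ip)

-- ===== LEMMAS AND PROOFS =====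

-- the singleton-string key is an injective renaming of the letter
theorem key_beq (c l : Char) : (String.ofList [c] == String.ofList [l]) = (c == l) := by
  simp [beq_eq_decide, String.ofList_inj]

-- A's "if absent: init to []; then append" is exactly modify with default []
theorem step_eq (pm : PySem.Dict String (List String)) (k : String) (w : String) :
    (if pm.contains k then pm else pm.insert k ([] : List String)).modify k [] (fun ws => ws ++ [w])
      = pm.modify k [] (fun ws => ws ++ [w]) := by
  by_cases h : pm.contains k = true
  · simp [h]
  · simp only [Bool.not_eq_true] at h
    rw [if_neg (by simp [h]), PySem.Dict.modify, PySem.Dict.modify,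
      PySem.Dict.getD_insert_self, PySem.Dict.insert_insert_self,
      PySem.Dict.getD_of_not_contains pm _ h]

-- the (key, word) pair stream that A's double loop processes
def pvPairs (ip : List String) : List (String × String) :=
  ip.flatMap (fun word => word.toList.map (fun c => (String.ofList [c], word)))

theorem foldA_eq (ip : List String) :
    (ip.foldl (fun pos_map word =>
      word.toList.foldl (fun pm letter =>
        let key := String.ofList [letter]
        let pm' := if pm.contains key then pm else pm.insert key ([] : List String)
        pm'.modify key [] (fun ws => ws ++ [word])) pos_map)
      (PySem.Dict.empty : PySem.Dict String (List String)))
    = (pvPairs ip).foldl (fun d p => d.modify p.1 [] (fun ws => ws ++ [p.2])) PySem.Dict.empty := by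
  rw [pvPairs, List.foldl_flatMap]
  apply PySem.List.foldl_congr_mem
  intro acc word _
  rw [List.foldl_map]
  apply PySem.List.foldl_congr_mem
  intro pm c _
  exact step_eq pm (String.ofList [c]) word

-- Set.ofList commutes with the injective key map
theorem contains_map_key (t : List Char) (x : Char) :
    PySem.Set.contains (t.map (fun c => String.ofList [c])) (String.ofList [x])
      = PySem.Set.contains t x := by
  simp [PySem.Set.contains, List.contains_eq_mem, String.ofList_inj]

theorem ofList_map_key_aux (xs : List Char) (t : List Char) :
    (xs.map (fun c => String.ofList [c])).foldl PySem.Set.add (t.map (fun c => String.ofList [c]))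
      = (xs.foldl PySem.Set.add t).map (fun c => String.ofList [c]) := by
  induction xs generalizing t with
  | nil => rfl
  | cons x xs ih =>
    simp only [List.map_cons, List.foldl_cons]
    have hadd : PySem.Set.add (t.map (fun c => String.ofList [c])) (String.ofList [x])
        = (PySem.Set.add t x).map (fun c => String.ofList [c]) := by
      by_cases h : PySem.Set.contains t x = true
      · rw [PySem.Set.add, PySem.Set.add, if_pos h, if_pos (by rw [contains_map_key]; exact h)]
      · rw [PySem.Set.add, PySem.Set.add, if_neg h,
          if_neg (by rw [contains_map_key]; exact h), List.map_append, List.map_singleton]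
    rw [hadd, ih]

theorem ofList_map_key (xs : List Char) :
    PySem.Set.ofList (xs.map (fun c => String.ofList [c]))
      = (PySem.Set.ofList xs).map (fun c => String.ofList [c]) := by
  simpa [PySem.Set.ofList, PySem.Set.empty] using ofList_map_key_aux xs []

-- the value A accumulates at key (String.ofList [c]) is B's comprehension for c
theorem vals_eq (ip : List String) (c : Char) :
    ((pvPairs ip).filter (fun p => p.1 == String.ofList [c])).map (fun p => p.2)
      = ip.flatMap (fun word => (word.toList.filter (fun c' => c' == c)).map (fun _ => word)) := by
  rw [pvPairs, List.filter_flatMap, List.map_flatMap]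
  apply List.flatMap_congr
  intro word _
  simp [List.filter_map, List.map_map, Function.comp_def, key_beq]

theorem get_letter_map_spec' (ip : List String) : get_letter_map ip = get_letter_map_alt ip := by
  rw [get_letter_map, get_letter_map_alt, foldA_eq]
  have hnd : ((pvPairs ip).foldl (fun d p => d.modify p.1 [] (fun ws => ws ++ [p.2]))
      (PySem.Dict.empty : PySem.Dict String (List String))).keys.Nodup :=
    PySem.Dict.nodup_keys_foldl_modify_key (pvPairs ip) (fun p => p.1) []
      (fun _ p => fun ws => ws ++ [p.2]) _ (by simp [PySem.Dict.empty])
  rw [PySem.Dict.items_eq_map_keys _ hnd []]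
  rw [PySem.Dict.keys_foldl_modify_key (pvPairs ip) (fun p => p.1) []
      (fun _ p => fun ws => ws ++ [p.2]), PySem.Dict.keys_empty]
  have hupd : ∀ L : List String, PySem.Set.update ([] : List String) L = PySem.Set.ofList L :=
    fun _ => rfl
  have hkeys : (pvPairs ip).map (fun p => p.1)
      = (ip.flatMap (fun word => word.toList)).map (fun c => String.ofList [c]) := by
    rw [pvPairs, List.map_flatMap, List.map_flatMap]
    simp [List.map_map, Function.comp_def]
  rw [hupd, hkeys, ofList_map_key, ← PySem.List.dedup_eq_ofList, List.map_map]
  apply List.map_congr_left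
  intro c _
  refine Prod.ext rfl ?_
  show ((pvPairs ip).foldl (fun d p => d.modify p.1 [] (fun ws => ws ++ [p.2]))
      (PySem.Dict.empty : PySem.Dict String (List String))).getD (String.ofList [c]) [] = _
  rw [PySem.Dict.getD_foldl_modify_append, PySem.Dict.getD_empty, List.nil_append, vals_eq]

-- ===== VERDICT (by name: the statement is the Claim_ definition above) =====
theorem get_letter_map_spec : Claim_equal_get_letter_map := by
  intro ip _
  exact get_letter_map_spec' ip
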